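-- pv_equiv track=rewrite | github.com/popop25/algorithm | programmers/숫자의표현.py | solution
-- ===== SOURCE A (Python) =====
-- def solution(n):
--     count = 0
--     k = 1
--     while k * (k - 1) // 2 < n:  # k*(k-1)/2가 n보다 작을 때까지만 탐색
--         # a가 양의 정수인지 확인
--         if (n - k * (k - 1) // 2) % k == 0:
--             count += 1
--         k += 1
--     return count
-- ===== SOURCE B (Python) =====
-- def solution(n):
--     # number of ways to write n as a sum of consecutive positive integers
--     # = number of odd divisors of n; count them in pairs (i, n//i) up to sqrt(n)
--     if n <= 0:
--         return 0
--     count = 0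
--     i = 1
--     while i * i <= n:
--         if n % i == 0:
--             if i % 2 == 1:
--                 count += 1
--             j = n // i
--             if j != i and j % 2 == 1:
--                 count += 1
--         i += 1
--     return count
-- ===== Notes on version B (the rewrite author's own statement) =====
-- stated objective: alternative
-- what changed: A scans every candidate run length while the triangular number stays below n, testing divisibility at each; B instead uses the theorem that the number of consecutive-sum representations equals the number of odd divisors of n, and counts odd divisors in complementary pairs while the loop index stays below the square root of n.
import Mathlib
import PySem

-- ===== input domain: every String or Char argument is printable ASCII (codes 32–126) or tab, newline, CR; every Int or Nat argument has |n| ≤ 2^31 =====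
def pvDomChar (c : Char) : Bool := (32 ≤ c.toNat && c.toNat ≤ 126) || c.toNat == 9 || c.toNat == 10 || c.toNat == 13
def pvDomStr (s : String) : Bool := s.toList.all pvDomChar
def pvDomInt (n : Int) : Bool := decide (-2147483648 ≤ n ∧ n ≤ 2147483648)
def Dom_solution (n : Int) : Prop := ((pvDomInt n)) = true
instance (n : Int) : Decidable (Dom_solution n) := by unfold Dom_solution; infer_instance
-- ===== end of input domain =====

-- B changes the algorithm: instead of A's scan over run lengths, B counts odd divisors of n
-- (equal by the consecutive-sum theorem) in pairs (i, n//i) for i up to sqrt(n); similar cost.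

-- ===== PORT A =====
-- termination helper: the loop guard forces k < 2*n + 2
theorem solutionLoop_guard_lt {n k : Int}
    (h : PySem.Int.floordiv (k * (k - 1)) 2 < n) : k < 2 * n + 2 := by
  rw [PySem.Int.floordiv_eq_ediv_of_pos (by norm_num)] at h
  rcases le_or_gt k 0 with hk | hk
  · have h0 : 0 ≤ k * (k - 1) := by nlinarith
    omega
  · have h0 : k - 1 ≤ k * (k - 1) := by nlinarith
    omega

def solutionLoop (n k count : Int) : Int :=
  if h : PySem.Int.floordiv (k * (k - 1)) 2 < n then
    solutionLoop n (k + 1)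
      (count + if PySem.Int.mod (n - PySem.Int.floordiv (k * (k - 1)) 2) k = 0 then 1 else 0)
  else count
  termination_by (2 * n + 2 - k).toNat
  decreasing_by
    have := solutionLoop_guard_lt h
    omega

def solution (n : Int) : Int := solutionLoop n 1 0

-- ===== PORT B =====
-- termination helper: the loop guard forces i ≤ n
theorem solutionAltLoop_guard_le {n i : Int} (h : i * i ≤ n) : i ≤ n := by
  rcases le_or_gt i 0 with hi | hi
  · nlinarith
  · nlinarith

def solutionAltLoop (n i count : Int) : Int :=
  if h : i * i ≤ n then
    solutionAltLoop n (i + 1)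
      (count +
        if PySem.Int.mod n i = 0 then
          (if PySem.Int.mod i 2 = 1 then 1 else 0) +
          (if PySem.Int.floordiv n i ≠ i ∧ PySem.Int.mod (PySem.Int.floordiv n i) 2 = 1 then 1
           else 0)
        else 0)
  else count
  termination_by (n + 1 - i).toNat
  decreasing_by
    have := solutionAltLoop_guard_le h
    omega

def solution_alt (n : Int) : Int :=
  if n ≤ 0 then 0 else solutionAltLoop n 1 0

-- ===== PRECONDITION & SPEC =====
def Spec_solution (n : Int) (out : Int) : Prop := out = solution_alt n
instance (n : Int) (out : Int) : Decidable (Spec_solution n out) := by unfold Spec_solution; infer_instance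

-- ===== CLAIM (what is proved, stated in full; the proofs are below) =====
def Claim_equal_solution : Prop := ∀ (n : Int), Dom_solution n → Spec_solution n (solution n)

-- ===== LEMMAS AND PROOFS =====

-- the Bool predicate counted by A's loop at index k
def predA (n k : Int) : Bool :=
  decide (PySem.Int.floordiv (k * (k - 1)) 2 < n) &&
  decide (PySem.Int.mod (n - PySem.Int.floordiv (k * (k - 1)) 2) k = 0)

-- the two Bool predicates counted by B's loop at index i (small divisor / paired large divisor)
def predS (n i : Int) : Bool :=
  decide (i * i ≤ n) && decide (PySem.Int.mod n i = 0) && decide (PySem.Int.mod i 2 = 1)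

def predL (n i : Int) : Bool :=
  decide (i * i ≤ n) && decide (PySem.Int.mod n i = 0) &&
  decide (PySem.Int.floordiv n i ≠ i ∧ PySem.Int.mod (PySem.Int.floordiv n i) 2 = 1)

theorem floordiv_two_mono {a b : Int} (h : a ≤ b) :
    PySem.Int.floordiv a 2 ≤ PySem.Int.floordiv b 2 := by
  rw [PySem.Int.floordiv_eq_ediv_of_pos (by norm_num),
      PySem.Int.floordiv_eq_ediv_of_pos (by norm_num)]
  omega

theorem tri_mono {k j : Int} (hk : 1 ≤ k) (hj : k ≤ j) : k * (k - 1) ≤ j * (j - 1) := by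
  nlinarith

theorem solutionLoop_eq (n k c : Int) (hk : 1 ≤ k) :
    solutionLoop n k c = c + (((Finset.Icc k (2 * n + 1)).filter (fun j => predA n j)).card : Int) := by
  induction k, c using solutionLoop.induct n with
  | case1 k c h ih =>
    simp only [dite_eq_ite] at ih
    rw [solutionLoop, dif_pos h, ih (by omega)]
    have hkM : k ≤ 2 * n + 1 := by have := solutionLoop_guard_lt h; omega
    rw [← Finset.insert_Icc_add_one_left_eq_Icc hkM, Finset.filter_insert]
    by_cases hm : PySem.Int.mod (n - PySem.Int.floordiv (k * (k - 1)) 2) k = 0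
    · have hpa : predA n k = true := by
        simp only [predA, Bool.and_eq_true, decide_eq_true_eq]; exact ⟨h, hm⟩
      rw [if_pos hpa, Finset.card_insert_of_notMem (by simp), if_pos hm]
      push_cast; ring
    · have hpa : ¬ predA n k = true := by
        simp only [predA, Bool.and_eq_true, decide_eq_true_eq, not_and]
        exact fun _ => hm
      rw [if_neg hpa, if_neg hm]
      ring
  | case2 k c h =>
    rw [solutionLoop, dif_neg h]
    have hempty : (Finset.Icc k (2 * n + 1)).filter (fun j => predA n j) = ∅ := by
      rw [Finset.filter_eq_empty_iff]
      intro j hj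
      simp only [Finset.mem_Icc] at hj
      simp only [predA, Bool.and_eq_true, decide_eq_true_eq, not_and]
      intro hlt
      exact absurd (lt_of_le_of_lt (floordiv_two_mono (tri_mono hk hj.1)) hlt) h
    rw [hempty]
    simp

theorem solutionAltLoop_eq (n i c : Int) (hi : 1 ≤ i) :
    solutionAltLoop n i c =
      c + (((Finset.Icc i n).filter (fun j => predS n j)).card : Int)
        + (((Finset.Icc i n).filter (fun j => predL n j)).card : Int) := by
  induction i, c using solutionAltLoop.induct n with
  | case1 i c h ih =>
    simp only [dite_eq_ite] at ih
    rw [solutionAltLoop, dif_pos h, ih (by omega)]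
    have hiM : i ≤ n := solutionAltLoop_guard_le h
    have hincr :
        (if PySem.Int.mod n i = 0 then
          (if PySem.Int.mod i 2 = 1 then 1 else 0) +
          (if PySem.Int.floordiv n i ≠ i ∧ PySem.Int.mod (PySem.Int.floordiv n i) 2 = 1 then 1
           else 0)
         else (0 : Int)) =
        (if predS n i then 1 else 0) + (if predL n i then 1 else 0) := by
      by_cases hd : PySem.Int.mod n i = 0 <;>
      by_cases ho : PySem.Int.mod i 2 = 1 <;>
      by_cases hl : PySem.Int.floordiv n i ≠ i ∧ PySem.Int.mod (PySem.Int.floordiv n i) 2 = 1 <;>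
        simp [predS, predL, h, hd, hl]
    have cardite : ∀ (b : Bool) (s : Finset Int), i ∉ s →
        (((if b = true then insert i s else s).card : Nat) : Int) =
          (if b = true then 1 else 0) + (s.card : Int) := by
      intro b s hs
      cases b
      · simp
      · simp [Finset.card_insert_of_notMem hs]
        omega
    rw [hincr, ← Finset.insert_Icc_add_one_left_eq_Icc hiM, Finset.filter_insert,
      Finset.filter_insert, cardite _ _ (by simp), cardite _ _ (by simp)]
    split_ifs <;> push_cast <;> ring
  | case2 i c h =>
    rw [solutionAltLoop, dif_neg h]
    have hsq : ∀ j, i ≤ j → ¬ (j * j ≤ n) := by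
      intro j hj hjn
      exact h (le_trans (by nlinarith) hjn)
    have hS : (Finset.Icc i n).filter (fun j => predS n j) = ∅ := by
      rw [Finset.filter_eq_empty_iff]
      intro j hj
      simp only [Finset.mem_Icc] at hj
      simp only [predS, Bool.and_eq_true, decide_eq_true_eq, not_and]
      exact fun hx => absurd hx.1 (hsq j hj.1)
    have hL : (Finset.Icc i n).filter (fun j => predL n j) = ∅ := by
      rw [Finset.filter_eq_empty_iff]
      intro j hj
      simp only [Finset.mem_Icc] at hj
      simp only [predL, Bool.and_eq_true, decide_eq_true_eq, not_and]
      exact fun hx => absurd hx.1 (hsq j hj.1)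
    rw [hS, hL]
    simp

-- Bool test: d is an odd divisor of n
def isOddDiv (n d : Int) : Bool := decide (n % d = 0) && decide (d % 2 = 1)

theorem consec_even (k : Int) : ∃ t, k * (k - 1) = 2 * t := by
  rcases Int.even_or_odd k with ⟨c, hc⟩ | ⟨c, hc⟩
  · exact ⟨c * (k - 1), by rw [hc]; ring⟩
  · exact ⟨k * c, by rw [hc]; ring⟩

theorem floordiv_two_exact {a t : Int} (h : a = 2 * t) : PySem.Int.floordiv a 2 = t := by
  rw [PySem.Int.floordiv_eq_ediv_of_pos (by norm_num)]
  omega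

theorem div_of_mul {k m c : Int} (hk : k ≠ 0) (h : k * m = c) : c / k = m := by
  rw [← h]
  exact Int.mul_ediv_cancel_left _ hk

-- A counts k iff 2n factors as k * m with m > k of opposite parity
theorem SA_struct {n k : Int} (hk : 1 ≤ k) (hA : predA n k = true) :
    ∃ m, k * m = 2 * n ∧ k + 1 ≤ m ∧ (k + m) % 2 = 1 := by
  obtain ⟨t, ht⟩ := consec_even k
  simp only [predA, Bool.and_eq_true, decide_eq_true_eq] at hA
  rw [floordiv_two_exact ht] at hA
  obtain ⟨hlt, hmod⟩ := hA
  rw [PySem.Int.mod_eq_emod_of_pos (by omega)] at hmod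
  obtain ⟨a, hna⟩ := Int.dvd_of_emod_eq_zero hmod
  have ha1 : 1 ≤ a := by
    rcases le_or_gt a 0 with h' | h'
    · nlinarith [mul_nonpos_of_nonneg_of_nonpos (show (0:ℤ) ≤ k by omega) h']
    · omega
  refine ⟨2 * a + k - 1, by linear_combination ht - 2 * hna, by omega, by omega⟩

theorem predA_of {n k m : Int} (hk : 1 ≤ k) (hkm : k * m = 2 * n) (hlt : k + 1 ≤ m)
    (hpar : (k + m) % 2 = 1) : predA n k = true := by
  obtain ⟨t, ht⟩ := consec_even k
  obtain ⟨a, ha, ha1⟩ : ∃ a, m - k + 1 = 2 * a ∧ 1 ≤ a := ⟨(m - k + 1) / 2, by omega, by omega⟩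
  have h2 : 2 * (n - t) = 2 * (k * a) := by linear_combination ht + k * ha - hkm
  have hnt : n - t = k * a := by omega
  simp only [predA, Bool.and_eq_true, decide_eq_true_eq]
  rw [floordiv_two_exact ht]
  refine ⟨by nlinarith [mul_pos (show (0:ℤ) < k by omega) (show (0:ℤ) < a by omega)], ?_⟩
  rw [PySem.Int.mod_eq_emod_of_pos (by omega)]
  exact Int.emod_eq_zero_of_dvd ⟨a, hnt⟩

theorem cardA_eq_oddDivs (n : Int) (hn : 1 ≤ n) :
    ((Finset.Icc 1 (2 * n + 1)).filter (fun j => predA n j)).card = ((Finset.Icc 1 n).filter (fun d => isOddDiv n d)).card := by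
  refine Finset.card_bij' (fun k _ => if k % 2 = 1 then k else 2 * n / k)
      (fun d _ => min d (2 * n / d)) ?hi ?hj ?li ?ri
  case hi =>
    -- forward membership: the odd one of the factor pair (k, 2n/k) is an odd divisor of n
    intro k hk
    simp only [Finset.mem_filter, Finset.mem_Icc] at hk
    obtain ⟨⟨hk1, hk2⟩, hA⟩ := hk
    obtain ⟨m, hkm, hlt, hpar⟩ := SA_struct hk1 hA
    simp only [Finset.mem_filter, Finset.mem_Icc, isOddDiv, Bool.and_eq_true, decide_eq_true_eq]
    by_cases hko : k % 2 = 1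
    · rw [if_pos hko]
      obtain ⟨b, hb⟩ : ∃ b, m = 2 * b := ⟨m / 2, by omega⟩
      have h2 : 2 * (k * b) = 2 * n := by linear_combination hkm - k * hb
      refine ⟨⟨hk1, ?_⟩, Int.emod_eq_zero_of_dvd ⟨b, by omega⟩, hko⟩
      nlinarith [mul_le_mul_of_nonneg_left (show (2:ℤ) ≤ m by omega) (show (0:ℤ) ≤ k by omega)]
    · rw [if_neg hko]
      rw [div_of_mul (show k ≠ 0 by omega) hkm]
      obtain ⟨c, hc⟩ : ∃ c, k = 2 * c := ⟨k / 2, by omega⟩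
      have h2 : 2 * (c * m) = 2 * n := by linear_combination hkm - m * hc
      have hcm : c * m = n := by omega
      refine ⟨⟨by omega, ?_⟩, Int.emod_eq_zero_of_dvd ⟨c, by linear_combination -hcm⟩, by omega⟩
      nlinarith [mul_le_mul_of_nonneg_right (show (1:ℤ) ≤ c by omega) (show (0:ℤ) ≤ m by omega)]
  case hj =>
    -- backward membership: an odd divisor d pairs with even 2n/d; the smaller one is counted by A
    intro d hd
    simp only [Finset.mem_filter, Finset.mem_Icc, isOddDiv, Bool.and_eq_true,
      decide_eq_true_eq] at hd
    obtain ⟨⟨hd1, hdn⟩, hmod, hodd⟩ := hd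
    obtain ⟨b, hb⟩ := Int.dvd_of_emod_eq_zero hmod
    have hb1 : 1 ≤ b := by
      rcases le_or_gt b 0 with h' | h'
      · nlinarith [mul_nonpos_of_nonneg_of_nonpos (show (0:ℤ) ≤ d by omega) h']
      · omega
    have he : 2 * n / d = 2 * b := div_of_mul (show d ≠ 0 by omega) (by linear_combination (-2) * hb)
    simp only [Finset.mem_filter, Finset.mem_Icc]
    rw [he]
    rcases lt_trichotomy d (2 * b) with h' | h' | h'
    · rw [min_eq_left (by omega)]
      exact ⟨⟨hd1, by omega⟩,
        predA_of (m := 2 * b) hd1 (by linear_combination (-2) * hb) (by omega) (by omega)⟩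
    · exfalso; omega
    · rw [min_eq_right (by omega)]
      have hbn : b ≤ n := by
        nlinarith [mul_le_mul_of_nonneg_right (show (1:ℤ) ≤ d by omega) (show (0:ℤ) ≤ b by omega)]
      exact ⟨⟨by omega, by omega⟩,
        predA_of (m := d) (by omega) (by linear_combination (-2) * hb) (by omega) (by omega)⟩
  case li =>
    -- left inverse
    intro k hk
    simp only [Finset.mem_filter, Finset.mem_Icc] at hk
    obtain ⟨⟨hk1, hk2⟩, hA⟩ := hk
    obtain ⟨m, hkm, hlt, hpar⟩ := SA_struct hk1 hA
    show min (if k % 2 = 1 then k else 2 * n / k) (2 * n / if k % 2 = 1 then k else 2 * n / k) = k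
    by_cases hko : k % 2 = 1
    · rw [if_pos hko, div_of_mul (show k ≠ 0 by omega) hkm]
      exact min_eq_left (by omega)
    · rw [if_neg hko, div_of_mul (show k ≠ 0 by omega) hkm,
        div_of_mul (show m ≠ 0 by omega) (show m * k = 2 * n by linear_combination hkm)]
      exact min_eq_right (by omega)
  case ri =>
    -- right inverse
    intro d hd
    simp only [Finset.mem_filter, Finset.mem_Icc, isOddDiv, Bool.and_eq_true,
      decide_eq_true_eq] at hd
    obtain ⟨⟨hd1, hdn⟩, hmod, hodd⟩ := hd
    obtain ⟨b, hb⟩ := Int.dvd_of_emod_eq_zero hmod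
    have hb1 : 1 ≤ b := by
      rcases le_or_gt b 0 with h' | h'
      · nlinarith [mul_nonpos_of_nonneg_of_nonpos (show (0:ℤ) ≤ d by omega) h']
      · omega
    have he : 2 * n / d = 2 * b := div_of_mul (show d ≠ 0 by omega) (by linear_combination (-2) * hb)
    show (if (min d (2 * n / d)) % 2 = 1 then min d (2 * n / d)
          else 2 * n / min d (2 * n / d)) = d
    rw [he]
    rcases lt_trichotomy d (2 * b) with h' | h' | h'
    · rw [min_eq_left (by omega), if_pos hodd]
    · exfalso; omega
    · rw [min_eq_right (by omega), if_neg (by omega)]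
      exact div_of_mul (by omega) (by linear_combination (-2) * hb)

-- d ∣ n (given via n % d = 0) with 1 ≤ d splits n = d * (n / d) with a well-behaved cofactor
theorem pair_div {n d : Int} (hn : 1 ≤ n) (h1 : 1 ≤ d) (hdvd : n % d = 0) :
    n = d * (n / d) ∧ 1 ≤ n / d ∧ n / d ≤ n ∧ n / (n / d) = d := by
  have hdvd' : d ∣ n := Int.dvd_of_emod_eq_zero hdvd
  set c := n / d with hcdef
  have he : d * c = n := Int.mul_ediv_cancel' hdvd'
  have hc1 : 1 ≤ c := by
    rcases le_or_gt c 0 with hc | hc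
    · nlinarith
    · omega
  refine ⟨he.symm, hc1, by nlinarith, ?_⟩
  rw [← he]
  exact Int.mul_ediv_cancel _ (by omega)

theorem oddDivs_eq_cardSL (n : Int) (hn : 1 ≤ n) :
    ((Finset.Icc 1 n).filter (fun d => isOddDiv n d)).card =
      ((Finset.Icc 1 n).filter (fun j => predS n j)).card
      + ((Finset.Icc 1 n).filter (fun j => predL n j)).card := by
  rw [← Finset.card_filter_add_card_filter_not
      (s := (Finset.Icc 1 n).filter (fun d => isOddDiv n d)) (fun d => d * d ≤ n)]
  have hsmall : ((Finset.Icc 1 n).filter (fun d => isOddDiv n d)).filter (fun d => d * d ≤ n)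
      = (Finset.Icc 1 n).filter (fun j => predS n j) := by
    ext d
    simp only [Finset.mem_filter, Finset.mem_Icc, isOddDiv, predS, Bool.and_eq_true,
      decide_eq_true_eq]
    constructor
    · rintro ⟨⟨⟨hd1, hdn⟩, hmod, hodd⟩, hsq⟩
      refine ⟨⟨hd1, hdn⟩, ⟨hsq, ?_⟩, ?_⟩
      · rw [PySem.Int.mod_eq_emod_of_pos (by omega)]; exact hmod
      · rw [PySem.Int.mod_eq_emod_of_pos (by norm_num)]; exact hodd
    · rintro ⟨⟨hd1, hdn⟩, ⟨hsq, hmod⟩, hodd⟩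
      rw [PySem.Int.mod_eq_emod_of_pos (by omega)] at hmod
      rw [PySem.Int.mod_eq_emod_of_pos (by norm_num)] at hodd
      exact ⟨⟨⟨hd1, hdn⟩, hmod, hodd⟩, hsq⟩
  have hlarge :
      (((Finset.Icc 1 n).filter (fun d => isOddDiv n d)).filter (fun d => ¬ d * d ≤ n)).card
      = ((Finset.Icc 1 n).filter (fun j => predL n j)).card := by
    apply Finset.card_bij' (fun d _ => n / d) (fun i _ => n / i)
    · -- forward membership: the cofactor of a large odd divisor is counted by predL
      intro d hd
      simp only [Finset.mem_filter, Finset.mem_Icc, isOddDiv, Bool.and_eq_true,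
        decide_eq_true_eq] at hd
      obtain ⟨⟨⟨hd1, hdn⟩, hmod, hodd⟩, hsq⟩ := hd
      rw [not_le] at hsq
      obtain ⟨he, hc1, hcn, hcd⟩ := pair_div hn hd1 hmod
      have hcltd : n / d < d := by
        have h' : d * (n / d) < d * d := by rw [← he]; exact hsq
        exact lt_of_mul_lt_mul_left h' (by omega)
      simp only [Finset.mem_filter, Finset.mem_Icc, predL, Bool.and_eq_true, decide_eq_true_eq]
      refine ⟨⟨hc1, hcn⟩, ⟨?_, ?_⟩, ?_, ?_⟩
      · nlinarith [mul_pos (show (0:ℤ) < d - n / d by omega) (show (0:ℤ) < n / d by omega)]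
      · rw [PySem.Int.mod_eq_emod_of_pos (by omega)]
        exact Int.emod_eq_zero_of_dvd ⟨d, by linear_combination he⟩
      · rw [PySem.Int.floordiv_eq_ediv_of_pos (by omega), hcd]; omega
      · rw [PySem.Int.floordiv_eq_ediv_of_pos (by omega), hcd,
            PySem.Int.mod_eq_emod_of_pos (by norm_num)]
        exact hodd
    · -- backward membership: predL's witness i yields the large odd divisor n / i
      intro i hi
      simp only [Finset.mem_filter, Finset.mem_Icc, predL, Bool.and_eq_true,
        decide_eq_true_eq] at hi
      obtain ⟨⟨hi1, hin⟩, ⟨hsq, hmod⟩, hne, hodd⟩ := hi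
      rw [PySem.Int.mod_eq_emod_of_pos (by omega)] at hmod
      rw [PySem.Int.floordiv_eq_ediv_of_pos (by omega)] at hne
      rw [PySem.Int.floordiv_eq_ediv_of_pos (by omega),
          PySem.Int.mod_eq_emod_of_pos (by norm_num)] at hodd
      obtain ⟨he, hc1, hcn, hcd⟩ := pair_div hn hi1 hmod
      have hilt : i < n / i := by
        have h' : i * i ≤ i * (n / i) := by rw [← he]; exact hsq
        exact lt_of_le_of_ne (le_of_mul_le_mul_left h' (by omega)) (fun h => hne h.symm)
      simp only [Finset.mem_filter, Finset.mem_Icc, isOddDiv, Bool.and_eq_true,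
        decide_eq_true_eq]
      refine ⟨⟨⟨hc1, hcn⟩, Int.emod_eq_zero_of_dvd ⟨i, by linear_combination he⟩, hodd⟩, ?_⟩
      intro hle
      nlinarith [mul_pos (show (0:ℤ) < n / i - i by omega) (show (0:ℤ) < n / i by omega)]
    · -- left inverse
      intro d hd
      simp only [Finset.mem_filter, Finset.mem_Icc, isOddDiv, Bool.and_eq_true,
        decide_eq_true_eq] at hd
      exact (pair_div hn hd.1.1.1 hd.1.2.1).2.2.2
    · -- right inverse
      intro i hi
      simp only [Finset.mem_filter, Finset.mem_Icc, predL, Bool.and_eq_true,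
        decide_eq_true_eq] at hi
      obtain ⟨⟨hi1, _⟩, ⟨_, hmod⟩, _, _⟩ := hi
      rw [PySem.Int.mod_eq_emod_of_pos (by omega)] at hmod
      exact (pair_div hn hi1 hmod).2.2.2
  rw [hsmall, hlarge]

-- ===== VERDICT (by name: the statement is the Claim_ definition above) =====
theorem solution_spec : Claim_equal_solution := by
  intro n _
  unfold Spec_solution solution solution_alt
  rcases le_or_gt n 0 with hn | hn
  · rw [solutionLoop]
    simp only [if_pos hn]
    have : ¬ PySem.Int.floordiv (1 * (1 - 1)) 2 < n := by
      norm_num [PySem.Int.floordiv_eq_ediv_of_pos]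
      omega
    rw [dif_neg this]
  · rw [if_neg (by omega)]
    rw [solutionLoop_eq n 1 0 le_rfl, solutionAltLoop_eq n 1 0 le_rfl]
    rw [cardA_eq_oddDivs n (by omega), oddDivs_eq_cardSL n (by omega)]
    push_cast
    ring
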